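/- GENERATED by farm/mkstatement.py from design/units.tsv (unit `sin_poly`) and the Specs of Vorbis/Spec/*.lean — do not edit.
   THE STATEMENT of the proof unit `sin_poly`: the function `sin_poly` (47 instructions) satisfies its contract,
   given the contracts of its callees. What the names mean: Vorbis/Spec/Basic.lean. The theorem to prove:
   `theorem sin_poly_ok : Vorbis.Spec.sin_poly.Statement`. -/
import Vorbis.Spec.Libm
namespace Vorbis.Spec.sin_poly
open X86 X86.User Asan

/-- The statement of unit `sin_poly`. -/
def Statement : Prop :=
  ∀ (Lay : Layout) (_hLay : Lay.hi = 0x1000000) (μ : Microarch) (_hμ : UserX.MicroOK μ) (u₀ : State)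
    (_hcode : HasCodeNat Lay u₀ Vorbis.L.sin_poly.entry Vorbis.Code.code_sin_poly.nat Vorbis.L.sin_poly.size),
    ∀ (others : List Obj) (frames : List (Nat × FrameLayout)), Calls Lay μ Vorbis.WayInv (Vorbis.conv u₀) Vorbis.L.sin_poly.entry (Vorbis.Spec.sin_poly.spec others frames)

end Vorbis.Spec.sin_poly
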